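-- pv_equiv track=rewrite | github.com/ChampionTej05/CodingChallenges | codes/code1.py | solutionPack
-- ===== SOURCE A (Python) =====
-- def solutionPack(packs, containers):
--     map = {}
--     result = []
--
--     for pack in packs:
--         found = False
--         for idx in range(len(containers)):
--             if idx not in map and pack <= containers[idx]:
--                 result.append(idx)
--                 map[idx] = True
--                 found = True
--                 break
--         if not found:
--             result.append(-1)
--
--     return result
-- ===== SOURCE B (Python) =====
-- def solutionPack(packs, containers):
--     # Keep only the still-available containers as (index, capacity) pairs;
--     # a matched container is removed, so it is never scanned again.
--     remaining = list(enumerate(containers))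
--     out = []
--     for p in packs:
--         chosen = -1
--         for j in range(len(remaining)):
--             if p <= remaining[j][1]:
--                 chosen = remaining[j][0]
--                 del remaining[j]
--                 break
--         out.append(chosen)
--     return out
-- ===== Notes on version B (the rewrite author's own statement) =====
-- stated objective: faster
-- what changed: B keeps a shrinking list of available (index, capacity) pairs and deletes a container once matched, so used containers are never rescanned, instead of A's used-index dict plus a rescan of all containers from index 0 for every pack.
import Mathlib
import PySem

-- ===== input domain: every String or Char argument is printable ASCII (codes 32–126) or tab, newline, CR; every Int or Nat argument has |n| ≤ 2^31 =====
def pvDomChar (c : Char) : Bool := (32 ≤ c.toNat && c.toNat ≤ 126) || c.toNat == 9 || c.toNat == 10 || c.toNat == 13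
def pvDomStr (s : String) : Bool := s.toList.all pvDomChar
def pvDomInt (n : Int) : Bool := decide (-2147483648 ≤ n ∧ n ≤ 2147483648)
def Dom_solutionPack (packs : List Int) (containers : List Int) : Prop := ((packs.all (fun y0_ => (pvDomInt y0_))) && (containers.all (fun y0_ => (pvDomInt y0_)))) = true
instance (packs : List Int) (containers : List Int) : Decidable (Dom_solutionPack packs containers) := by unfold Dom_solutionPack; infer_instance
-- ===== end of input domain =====

-- B replaces A's used-index dict plus full rescan per pack by a shrinking list of
-- available (index, capacity) pairs from which a matched container is deleted (alternative structure).

-- ===== PORT A =====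
-- inner loop: `for idx in range(len(containers)): if idx not in map and pack <= containers[idx]: ... break`
-- containers[idx] is always in range here, so pyGetD with default 0 is exact.
def solPackInnerA (containers : List Int) (m : PySem.Dict Int Bool) (pack : Int) : List Int → Option Int
  | [] => none
  | idx :: rest =>
    if m.contains idx = false ∧ pack ≤ PySem.List.pyGetD containers idx 0 then some idx
    else solPackInnerA containers m pack rest

def solPackGoA (containers : List Int) : List Int → PySem.Dict Int Bool → List Int → List Int
  | [], _, result => result
  | pack :: ps, m, result =>
    match solPackInnerA containers m pack (PySem.List.pyRange 0 (containers.length : Int) 1) with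
    | some idx => solPackGoA containers ps (m.insert idx true) (result ++ [idx])
    | none => solPackGoA containers ps m (result ++ [-1])

def solutionPack (packs : List Int) (containers : List Int) : List Int :=
  solPackGoA containers packs PySem.Dict.empty []

-- ===== PORT B =====
-- scan the remaining (index, capacity) pairs; on the first fit return its index and delete it,
-- otherwise return -1 with the list unchanged.
def solPackPickB (p : Int) : List (Int × Int) → Int × List (Int × Int)
  | [] => (-1, [])
  | (i, c) :: rest =>
    if p ≤ c then (i, rest)
    else
      let r := solPackPickB p rest
      (r.1, (i, c) :: r.2)

def solPackGoB : List Int → List (Int × Int) → List Int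
  | [], _ => []
  | p :: ps, remaining =>
    let r := solPackPickB p remaining
    r.1 :: solPackGoB ps r.2

def solutionPack_alt (packs : List Int) (containers : List Int) : List Int :=
  solPackGoB packs (PySem.List.enumerate containers 0)

-- ===== PRECONDITION & SPEC =====
def Spec_solutionPack (packs : List Int) (containers : List Int) (out : List Int) : Prop := out = solutionPack_alt packs containers
instance (packs : List Int) (containers : List Int) (out : List Int) : Decidable (Spec_solutionPack packs containers out) := by unfold Spec_solutionPack; infer_instance

-- ===== CLAIM (what is proved, stated in full; the proofs are below) =====
def Claim_equal_solutionPack : Prop := ∀ (packs : List Int) (containers : List Int), Dom_solutionPack packs containers → Spec_solutionPack packs containers (solutionPack packs containers)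

-- ===== LEMMAS AND PROOFS =====

lemma solPackInnerA_mem (containers : List Int) (m : PySem.Dict Int Bool) (p : Int) :
    ∀ (L : List Int) (i : Int), solPackInnerA containers m p L = some i → i ∈ L := by
  intro L
  induction L with
  | nil => intro i h; simp [solPackInnerA] at h
  | cons x rest ih =>
    intro i h
    simp only [solPackInnerA] at h
    split_ifs at h with hc
    · simp at h; simp [h]
    · exact List.mem_cons_of_mem _ (ih i h)

-- the available pairs, as the filter of a pair list by "index not yet used"
lemma pick_eq_inner (containers : List Int) (p : Int) :
    ∀ (pairs : List (Int × Int)) (m : PySem.Dict Int Bool),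
      (∀ q ∈ pairs, q.2 = PySem.List.pyGetD containers q.1 0) →
      pairs.Pairwise (fun a b => a.1 ≠ b.1) →
      solPackPickB p (pairs.filter (fun q => !(m.contains q.1))) =
        match solPackInnerA containers m p (pairs.map Prod.fst) with
        | none => (-1, pairs.filter (fun q => !(m.contains q.1)))
        | some i => (i, pairs.filter (fun q => !((m.insert i true).contains q.1))) := by
  intro pairs
  induction pairs with
  | nil => intro m _ _; simp [solPackPickB, solPackInnerA]
  | cons q rest ih =>
    intro m hcap hnd
    obtain ⟨j, c⟩ := q
    have hne : ∀ b ∈ rest, j ≠ b.1 := by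
      intro b hb; exact (List.pairwise_cons.mp hnd).1 b hb
    have hnd' := (List.pairwise_cons.mp hnd).2
    have hcap' : ∀ q ∈ rest, q.2 = PySem.List.pyGetD containers q.1 0 := by
      intro q hq; exact hcap q (List.mem_cons_of_mem _ hq)
    by_cases hcj : m.contains j = true
    · -- index j already used: both sides skip it
      have hfil : ((j, c) :: rest).filter (fun q => !(m.contains q.1)) =
          rest.filter (fun q => !(m.contains q.1)) := by
        simp [hcj]
      have hA : solPackInnerA containers m p (((j, c) :: rest).map Prod.fst) =
          solPackInnerA containers m p (rest.map Prod.fst) := by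
        simp [solPackInnerA, hcj]
      rw [hfil, hA, ih m hcap' hnd']
      cases hrec : solPackInnerA containers m p (rest.map Prod.fst) with
      | none => simp
      | some i =>
        have : ((m.insert i true).contains j) = true := by
          rw [PySem.Dict.contains_insert]; simp [hcj]
        simp [this]
    · -- index j available
      have hcjf : m.contains j = false := by simp at hcj; exact hcj
      have hc : c = PySem.List.pyGetD containers j 0 := hcap (j, c) (List.mem_cons_self)
      have hfil : ((j, c) :: rest).filter (fun q => !(m.contains q.1)) =
          (j, c) :: rest.filter (fun q => !(m.contains q.1)) := by
        simp [hcjf]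
      by_cases hpc : p ≤ c
      · -- first fit is j on both sides
        have hA : solPackInnerA containers m p (((j, c) :: rest).map Prod.fst) = some j := by
          simp [solPackInnerA, hcjf, ← hc, hpc]
        rw [hfil, hA]
        simp only [solPackPickB, if_pos hpc]
        have h1 : ((m.insert j true).contains j) = true := by
          rw [PySem.Dict.contains_insert]; simp
        have h2 : rest.filter (fun q => !((m.insert j true).contains q.1)) =
            rest.filter (fun q => !(m.contains q.1)) := by
          apply List.filter_congr
          intro q hq
          rw [PySem.Dict.contains_insert]
          have : (q.1 == j) = false := by
            simp; exact fun h => (hne q hq) h.symm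
          simp [this]
        simp [h1, h2]
      · -- j does not fit: both sides keep it and recurse
        have hA : solPackInnerA containers m p (((j, c) :: rest).map Prod.fst) =
            solPackInnerA containers m p (rest.map Prod.fst) := by
          simp [solPackInnerA, ← hc, hpc]
        rw [hfil, hA]
        simp only [solPackPickB, if_neg hpc]
        rw [ih m hcap' hnd']
        cases hrec : solPackInnerA containers m p (rest.map Prod.fst) with
        | none => simp
        | some i =>
          have hij : i ≠ j := by
            have hi := solPackInnerA_mem containers m p _ i hrec
            rcases List.mem_map.mp hi with ⟨b, hb, hbi⟩
            exact fun h => hne b hb ((hbi.trans h).symm)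
          have : ((m.insert i true).contains j) = false := by
            rw [PySem.Dict.contains_insert]
            have : (j == i) = false := by simp; exact fun h => hij h.symm
            simp [this, hcjf]
          simp [this]

lemma enumerate_cap (containers : List Int) :
    ∀ q ∈ PySem.List.enumerate containers 0, q.2 = PySem.List.pyGetD containers q.1 0 := by
  intro q hq
  rcases (PySem.List.mem_enumerate_iff _ _ _).mp hq with ⟨k, hk, rfl⟩
  simp [List.getElem?_eq_getElem hk]

lemma enumerate_ne (containers : List Int) :
    (PySem.List.enumerate containers 0).Pairwise (fun a b => a.1 ≠ b.1) := by
  exact (PySem.List.pairwise_lt_enumerate containers 0).imp (fun h => ne_of_lt h)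

lemma range_eq_map_fst (containers : List Int) :
    PySem.List.pyRange 0 (containers.length : Int) 1 =
      (PySem.List.enumerate containers 0).map Prod.fst := by
  have := PySem.List.map_fst_enumerate containers 0
  simpa using this.symm

lemma goA_eq_goB (containers : List Int) :
    ∀ (packs : List Int) (m : PySem.Dict Int Bool) (result : List Int),
      solPackGoA containers packs m result =
        result ++ solPackGoB packs
          ((PySem.List.enumerate containers 0).filter (fun q => !(m.contains q.1))) := by
  intro packs
  induction packs with
  | nil => intro m result; simp [solPackGoA, solPackGoB]
  | cons p ps ih =>
    intro m result
    have hpick := pick_eq_inner containers p (PySem.List.enumerate containers 0) m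
      (enumerate_cap containers) (enumerate_ne containers)
    simp only [solPackGoA, solPackGoB, range_eq_map_fst containers]
    cases hrec : solPackInnerA containers m p ((PySem.List.enumerate containers 0).map Prod.fst) with
    | none =>
      rw [hrec] at hpick
      simp only [hpick, ih]
      simp
    | some i =>
      rw [hrec] at hpick
      simp only [hpick, ih]
      simp

-- ===== VERDICT (by name: the statement is the Claim_ definition above) =====
theorem solutionPack_spec : Claim_equal_solutionPack := by
  intro packs containers _
  unfold Spec_solutionPack solutionPack solutionPack_alt
  rw [goA_eq_goB]
  simp [PySem.Dict.contains_empty, List.filter_true]
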